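-- pv_equiv track=rewrite | github.com/danielrzad/2015_Advent_of_Code | 5 day 2 ex.py | first_condition_check
-- ===== SOURCE A (Python) =====
-- def first_condition_check(string):
-- 	first_req = 0
-- 	second_req = 0
-- 	for i in range(len(string) - 2):
-- 		if string[i:i+2] in string[i+2:]:
-- 			first_req += 1
-- 		if string[i] != string[i+2]:
-- 			second_req += 1
-- 		if first_req > 0 and second_req > 0:
-- 			return True
-- ===== SOURCE B (Python) =====
-- def first_condition_check(string):
--     n = len(string)
--     # pair repeated later without overlap: scan once, remembering pairs seen two positions back
--     seen = set()
--     pair = False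
--     for j in range(n - 1):
--         if j >= 2:
--             seen.add((string[j - 2], string[j - 1]))
--         if (string[j], string[j + 1]) in seen:
--             pair = True
--             break
--     gap = any(string[i] != string[i + 2] for i in range(n - 2))
--     if pair and gap:
--         return True
-- ===== Notes on version B (the rewrite author's own statement) =====
-- stated objective: faster
-- what changed: A re-scans the whole suffix with a substring test at every index (quadratic); B does one linear scan that remembers in a set the letter pairs seen two or more positions back, and a single linear scan for the gapped-letter test.
import Mathlib
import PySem

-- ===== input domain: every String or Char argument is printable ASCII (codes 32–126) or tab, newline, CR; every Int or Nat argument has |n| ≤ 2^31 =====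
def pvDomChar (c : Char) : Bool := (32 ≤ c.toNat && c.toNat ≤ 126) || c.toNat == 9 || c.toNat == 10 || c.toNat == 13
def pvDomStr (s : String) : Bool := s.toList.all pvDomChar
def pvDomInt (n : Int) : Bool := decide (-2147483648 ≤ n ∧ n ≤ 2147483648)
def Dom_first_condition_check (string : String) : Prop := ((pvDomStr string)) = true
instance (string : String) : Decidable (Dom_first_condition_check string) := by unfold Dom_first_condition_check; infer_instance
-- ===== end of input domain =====

-- B replaces A's per-index substring search (quadratic) with one linear scan over a set of
-- the letter pairs seen at least two positions back, plus a single any-scan for the gap test.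

-- ===== PORT A =====
-- A's two per-index tests: string[i:i+2] in string[i+2:]  and  string[i] != string[i+2]
def fccC1 (s : List Char) (i : Int) : Bool :=
  PySem.Chars.isIn (PySem.List.slice s (some i) (some (i + 2)))
    (PySem.List.slice s (some (i + 2)) none)

def fccC2 (s : List Char) (i : Int) : Bool :=
  decide (PySem.List.pyGet? s i ≠ PySem.List.pyGet? s (i + 2))

-- A's loop: counters first_req/second_req, early `return True` once both are positive;
-- falling off the loop is Python's implicit `return None` (`none`).
def fccLoopA (s : List Char) (fr sr : Int) : List Int → Option Bool
  | [] => none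
  | i :: rest =>
    let fr' := if fccC1 s i then fr + 1 else fr
    let sr' := if fccC2 s i then sr + 1 else sr
    if 0 < fr' ∧ 0 < sr' then some true else fccLoopA s fr' sr' rest

def first_condition_check (string : String) : Option Bool :=
  fccLoopA string.toList 0 0 (PySem.List.pyRange 0 (PySem.Str.len string - 2))

-- ===== PORT B =====
-- B's pair scan: `seen` holds the (char, char) pairs that start at least two positions
-- before the current index j; a hit there is a non-overlapping repeated pair.
def fccPairLoop (s : List Char) (seen : PySem.Set (Option Char × Option Char)) :
    List Int → Bool
  | [] => false
  | j :: rest =>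
    let seen' := if 2 ≤ j then
        PySem.Set.add seen (PySem.List.pyGet? s (j - 2), PySem.List.pyGet? s (j - 1))
      else seen
    if PySem.Set.contains seen' (PySem.List.pyGet? s j, PySem.List.pyGet? s (j + 1)) then true
    else fccPairLoop s seen' rest

def first_condition_check_alt (string : String) : Option Bool :=
  let s := string.toList
  let n := PySem.Str.len string
  let pair := fccPairLoop s PySem.Set.empty (PySem.List.pyRange 0 (n - 1))
  let gap := (PySem.List.pyRange 0 (n - 2)).any
      (fun i => decide (PySem.List.pyGet? s i ≠ PySem.List.pyGet? s (i + 2)))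
  if pair ∧ gap then some true else none

-- ===== PRECONDITION & SPEC =====
def Spec_first_condition_check (string : String) (out : Option Bool) : Prop := out = first_condition_check_alt string
instance (string : String) (out : Option Bool) : Decidable (Spec_first_condition_check string out) := by unfold Spec_first_condition_check; infer_instance

-- ===== CLAIM (what is proved, stated in full; the proofs are below) =====
def Claim_equal_first_condition_check : Prop := ∀ (string : String), Dom_first_condition_check string → Spec_first_condition_check string (first_condition_check string)

-- ===== LEMMAS AND PROOFS =====

theorem fccLoopA_eq (s : List Char) (l : List Int) : ∀ (fr sr : Int), 0 ≤ fr → 0 ≤ sr →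
    ¬(0 < fr ∧ 0 < sr) →
    fccLoopA s fr sr l =
      if (0 < fr ∨ l.any (fccC1 s)) ∧ (0 < sr ∨ l.any (fccC2 s)) then some true else none := by
  induction l with
  | nil => intro fr sr h1 h2 h3; simp [fccLoopA]; omega
  | cons i rest ih =>
    intro fr sr h1 h2 h3
    by_cases hc1 : fccC1 s i <;> by_cases hc2 : fccC2 s i <;>
      [skip; skip; skip; skip] <;>
      simp only [Bool.not_eq_true] at hc1 hc2 <;>
      simp only [fccLoopA, List.any_cons, hc1, hc2, Bool.false_eq_true, if_true, if_false,
        Bool.true_or, Bool.false_or]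
    · rw [if_pos ⟨by omega, by omega⟩, eq_comm, if_pos ⟨by simp, by simp⟩]
    · by_cases hsr : 0 < sr
      · rw [if_pos ⟨by omega, hsr⟩, eq_comm, if_pos ⟨by simp, Or.inl hsr⟩]
      · rw [if_neg (fun h => hsr h.2), ih (fr + 1) sr (by omega) h2 (fun h => hsr h.2)]
        have hpos : 0 < fr + 1 := by omega
        simp [hpos]
    · by_cases hfr : 0 < fr
      · rw [if_pos ⟨hfr, by omega⟩, eq_comm, if_pos ⟨Or.inl hfr, by simp⟩]
      · rw [if_neg (fun h => hfr h.1), ih fr (sr + 1) h1 (by omega) (fun h => hfr h.1)]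
        have hpos : 0 < sr + 1 := by omega
        simp [hpos]
    · rw [if_neg h3, ih fr sr h1 h2 h3]

def fccPr (s : List Char) (k : Int) : Option Char × Option Char :=
  (PySem.List.pyGet? s k, PySem.List.pyGet? s (k + 1))

theorem fccPr_natCast (s : List Char) (b : Nat) (hb : b + 1 < s.length) :
    fccPr s (b : Int) = (some s[b], some s[b + 1]) := by
  have h1 : ((b : Int) + 1) = ((b + 1 : Nat) : Int) := by push_cast; ring
  rw [fccPr, h1, PySem.List.pyGet?_natCast, PySem.List.pyGet?_natCast,
    List.getElem?_eq_getElem (by omega), List.getElem?_eq_getElem hb]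

theorem infix_pair_iff (t : List Char) (a b : Char) :
    ([a, b] <:+: t) ↔ ∃ k : Nat, t[k]? = some a ∧ t[k + 1]? = some b := by
  induction t with
  | nil => simp
  | cons c t' ih =>
    rw [List.infix_cons_iff]
    constructor
    · rintro (hp | hi)
      · rw [List.cons_prefix_cons] at hp
        obtain ⟨rfl, hb⟩ := hp
        cases t' with
        | nil => simp at hb
        | cons d t'' =>
          rw [List.cons_prefix_cons] at hb
          exact ⟨0, by simp [hb.1]⟩
      · obtain ⟨k, h1, h2⟩ := ih.mp hi
        exact ⟨k + 1, by simpa using h1, by simpa using h2⟩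
    · rintro ⟨k, h1, h2⟩
      cases k with
      | zero =>
        left
        simp only [List.getElem?_cons_zero, Option.some.injEq] at h1
        cases t' with
        | nil => simp at h2
        | cons d t'' =>
          simp only [List.getElem?_cons_succ, List.getElem?_cons_zero, Option.some.injEq] at h2
          rw [List.cons_prefix_cons]
          exact ⟨h1.symm, by rw [h2, List.cons_prefix_cons]; exact ⟨rfl, List.nil_prefix⟩⟩
      | succ k' =>
        right
        exact ih.mpr ⟨k', by simpa using h1, by simpa using h2⟩

theorem fccC1_iff (s : List Char) (i : Int) (h0 : 0 ≤ i) (h2 : i < (s.length : Int) - 2) :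
    fccC1 s i = true ↔
      ∃ j : Int, i + 2 ≤ j ∧ j < (s.length : Int) - 1 ∧ fccPr s i = fccPr s j := by
  obtain ⟨a, rfl⟩ := Int.eq_ofNat_of_zero_le h0
  have h1a : a < s.length := by omega
  have h1b : a + 1 < s.length := by omega
  have hcast : ((a : Int) + 2) = ((a + 2 : Nat) : Int) := by push_cast; ring
  have hs1 : PySem.List.slice s (some (a : Int)) (some ((a : Int) + 2)) = [s[a], s[a + 1]] := by
    rw [hcast, PySem.List.slice_natCast]
    rw [show a + 2 - a = 2 from by omega, List.drop_eq_getElem_cons h1a,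
      List.drop_eq_getElem_cons h1b]
    rfl
  have hs2 : PySem.List.slice s (some ((a : Int) + 2)) none = s.drop (a + 2) := by
    rw [hcast, PySem.List.slice_from_natCast]
  rw [show fccC1 s (a : Int) = PySem.Chars.isIn
        (PySem.List.slice s (some (a : Int)) (some ((a : Int) + 2)))
        (PySem.List.slice s (some ((a : Int) + 2)) none) from rfl,
    hs1, hs2, PySem.Chars.isIn_iff_infix, infix_pair_iff]
  constructor
  · rintro ⟨k, hk1, hk2⟩
    rw [List.getElem?_drop] at hk1 hk2
    rw [show a + 2 + (k + 1) = a + 2 + k + 1 from by omega] at hk2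
    obtain ⟨hlt1, he1⟩ := List.getElem?_eq_some_iff.mp hk1
    obtain ⟨hlt2, he2⟩ := List.getElem?_eq_some_iff.mp hk2
    refine ⟨((a + 2 + k : Nat) : Int), by push_cast; omega, by omega, ?_⟩
    rw [fccPr_natCast s a h1b, fccPr_natCast s (a + 2 + k) (by omega)]
    rw [he1, he2]
  · rintro ⟨j, hj1, hj2, heq⟩
    obtain ⟨b, rfl⟩ := Int.eq_ofNat_of_zero_le (by omega : (0:Int) ≤ j)
    have hb : b + 1 < s.length := by omega
    rw [fccPr_natCast s a h1b, fccPr_natCast s b hb, Prod.mk.injEq,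
      Option.some.injEq, Option.some.injEq] at heq
    refine ⟨b - (a + 2), ?_, ?_⟩
    · rw [List.getElem?_drop, show a + 2 + (b - (a + 2)) = b from by omega,
        List.getElem?_eq_getElem (by omega), heq.1]
    · rw [List.getElem?_drop, show a + 2 + (b - (a + 2) + 1) = b + 1 from by omega,
        List.getElem?_eq_getElem hb, heq.2]

theorem fccPairLoop_iff (s : List Char) : ∀ (m : Nat) (t : Int)
    (seen : PySem.Set (Option Char × Option Char)),
    0 ≤ t → m = ((s.length : Int) - 1 - t).toNat →
    (∀ p, p ∈ seen ↔ ∃ i : Int, 0 ≤ i ∧ i + 3 ≤ t ∧ p = fccPr s i) →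
    (fccPairLoop s seen (PySem.List.pyRange t ((s.length : Int) - 1)) = true ↔
      ∃ j : Int, t ≤ j ∧ j < (s.length : Int) - 1 ∧
        ∃ i : Int, 0 ≤ i ∧ i + 2 ≤ j ∧ fccPr s i = fccPr s j) := by
  intro m
  induction m with
  | zero =>
    intro t seen ht hm hseen
    rw [PySem.List.pyRange_one_eq_nil (by omega)]
    simp only [fccPairLoop, Bool.false_eq_true, false_iff]
    rintro ⟨j, hj1, hj2, -⟩; omega
  | succ m' ih =>
    intro t seen ht hm hseen
    by_cases hend : (s.length : Int) - 1 ≤ t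
    · rw [PySem.List.pyRange_one_eq_nil hend]
      simp only [fccPairLoop, Bool.false_eq_true, false_iff]
      rintro ⟨j, hj1, hj2, -⟩; omega
    · rw [PySem.List.pyRange_one_cons (by omega)]
      simp only [fccPairLoop]
      have hseen' : ∀ p, p ∈ (if 2 ≤ t then
            PySem.Set.add seen (PySem.List.pyGet? s (t - 2), PySem.List.pyGet? s (t - 1))
          else seen) ↔ ∃ i : Int, 0 ≤ i ∧ i + 3 ≤ t + 1 ∧ p = fccPr s i := by
        intro p
        by_cases ht2 : 2 ≤ t
        · rw [if_pos ht2, PySem.Set.mem_add]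
          have hprt : (PySem.List.pyGet? s (t - 2), PySem.List.pyGet? s (t - 1))
              = fccPr s (t - 2) := by
            rw [fccPr, show t - 2 + 1 = t - 1 from by ring]
          rw [hprt, hseen p]
          constructor
          · rintro (⟨i, h1, h2, h3⟩ | rfl)
            · exact ⟨i, h1, by omega, h3⟩
            · exact ⟨t - 2, by omega, by omega, rfl⟩
          · rintro ⟨i, h1, h2, h3⟩
            by_cases hit : i + 3 ≤ t
            · exact Or.inl ⟨i, h1, hit, h3⟩
            · right; rw [h3, show i = t - 2 from by omega]
        · rw [if_neg ht2, hseen p]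
          constructor
          · rintro ⟨i, h1, h2, h3⟩; exact ⟨i, h1, by omega, h3⟩
          · rintro ⟨i, h1, h2, h3⟩; exact ⟨i, h1, by omega, h3⟩
      by_cases hct : PySem.Set.contains (if 2 ≤ t then
            PySem.Set.add seen (PySem.List.pyGet? s (t - 2), PySem.List.pyGet? s (t - 1))
          else seen) (PySem.List.pyGet? s t, PySem.List.pyGet? s (t + 1)) = true
      · rw [if_pos hct]
        obtain ⟨i, h1, h2, h3⟩ := (hseen' (fccPr s t)).mp ((PySem.Set.contains_iff _ _).mp hct)
        simp only [true_iff]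
        exact ⟨t, le_refl t, by omega, i, h1, by omega, h3.symm⟩
      · rw [if_neg hct, ih (t + 1) _ (by omega) (by omega) hseen']
        constructor
        · rintro ⟨j, hj1, hj2, i, h1, h2, h3⟩; exact ⟨j, by omega, hj2, i, h1, h2, h3⟩
        · rintro ⟨j, hj1, hj2, i, h1, h2, h3⟩
          refine ⟨j, ?_, hj2, i, h1, h2, h3⟩
          by_contra hjt
          have hjeq : j = t := by omega
          subst hjeq
          exact hct ((PySem.Set.contains_iff _ _).mpr
            ((hseen' (fccPr s j)).mpr ⟨i, h1, by omega, h3.symm⟩))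

theorem fcc_main (string : String) :
    first_condition_check string = first_condition_check_alt string := by
  simp only [first_condition_check, first_condition_check_alt]
  rw [PySem.Str.len_eq]
  have hfun : (fun i => decide (PySem.List.pyGet? string.toList i ≠
      PySem.List.pyGet? string.toList (i + 2))) = fccC2 string.toList := rfl
  rw [hfun]
  rw [fccLoopA_eq string.toList _ 0 0 (le_refl 0) (le_refl 0) (by omega)]
  have hpair : fccPairLoop string.toList PySem.Set.empty
      (PySem.List.pyRange 0 ((string.toList.length : Int) - 1)) =
      (PySem.List.pyRange 0 ((string.toList.length : Int) - 2)).any (fccC1 string.toList) := by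
    rw [Bool.eq_iff_iff]
    rw [fccPairLoop_iff string.toList (((string.toList.length : Int) - 1 - 0).toNat) 0
      PySem.Set.empty (le_refl 0) rfl ?_]
    · rw [List.any_eq_true]
      constructor
      · rintro ⟨j, hj0, hj2, i, hi0, hi2, heq⟩
        refine ⟨i, PySem.List.mem_pyRange_one.mpr ⟨hi0, by omega⟩, ?_⟩
        exact (fccC1_iff string.toList i hi0 (by omega)).mpr ⟨j, hi2, hj2, heq⟩
      · rintro ⟨x, hx, hc⟩
        obtain ⟨hx0, hx2⟩ := PySem.List.mem_pyRange_one.mp hx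
        obtain ⟨j, hj1, hj2, heq⟩ := (fccC1_iff string.toList x hx0 hx2).mp hc
        exact ⟨j, by omega, hj2, x, hx0, hj1, heq⟩
    · intro p
      simp only [PySem.Set.empty, List.not_mem_nil, false_iff]
      rintro ⟨i, h1, h2, -⟩; omega
  rw [hpair]
  simp only [lt_self_iff_false, false_or]

-- ===== VERDICT (by name: the statement is the Claim_ definition above) =====
theorem first_condition_check_spec : Claim_equal_first_condition_check := by
  intro string _
  exact fcc_main string
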